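-- pv_equiv track=rewrite | github.com/ncl-icb-analytics/dbt-OLIDS | scripts/fix_yaml_description_spacing.py | fix_specific_headers
-- ===== SOURCE A (Python) =====
-- def fix_specific_headers(content, headers=None):
--     """
--     Fix spacing above specific headers (like "Business Logic:").
--
--     Args:
--         content (str): File content
--         headers (list): List of header patterns to fix (default: ["Business Logic:"])
--
--     Returns:
--         str: Content with fixed header spacing
--     """
--     if headers is None:
--         headers = ["Business Logic:"]
--
--     lines = content.split('\n')
--     fixed_lines = []
--
--     for i, line in enumerate(lines):
--         # Check if this line contains any of the target headers
--         for header in headers: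
--             if line.strip().endswith(header):
--                 # Remove existing blank lines above
--                 while fixed_lines and not fixed_lines[-1].strip():
--                     fixed_lines.pop()
--
--                 # Add exactly 2 blank lines
--                 fixed_lines.extend(['', ''])
--                 break
--
--         fixed_lines.append(line)
--
--     return '\n'.join(fixed_lines)
-- ===== SOURCE B (Python) =====
-- def fix_specific_headers(content, headers=None):
--     if headers is None:
--         headers = ["Business Logic:"]
--
--     def is_header(line):
--         return any(line.strip().endswith(h) for h in headers)
--
--     out = []
--     drop_blanks = False  # True when the line below (already emitted) is a header needing its 2-blank prefix
--     for line in reversed(content.split('\n')):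
--         if is_header(line):
--             out.append(line)
--             out.append('')
--             out.append('')
--             drop_blanks = True
--         elif not line.strip() and drop_blanks:
--             pass  # blank line directly above a header block: dropped
--         else:
--             out.append(line)
--             drop_blanks = False
--     return '\n'.join(reversed(out))
-- ===== Notes on version B (the rewrite author's own statement) =====
-- stated objective: alternative
-- what changed: Single reverse pass with a drop-blanks flag that skips blank lines directly above a header, instead of A's forward pass that pops already-emitted blank lines off the output list.
-- outside the precondition, e.g. on fix_specific_headers('a\n\nb', ['']): A returns '\n\na\n\n\nb', B returns '\n\na\n\n\n\n\n\nb'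
import Mathlib
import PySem

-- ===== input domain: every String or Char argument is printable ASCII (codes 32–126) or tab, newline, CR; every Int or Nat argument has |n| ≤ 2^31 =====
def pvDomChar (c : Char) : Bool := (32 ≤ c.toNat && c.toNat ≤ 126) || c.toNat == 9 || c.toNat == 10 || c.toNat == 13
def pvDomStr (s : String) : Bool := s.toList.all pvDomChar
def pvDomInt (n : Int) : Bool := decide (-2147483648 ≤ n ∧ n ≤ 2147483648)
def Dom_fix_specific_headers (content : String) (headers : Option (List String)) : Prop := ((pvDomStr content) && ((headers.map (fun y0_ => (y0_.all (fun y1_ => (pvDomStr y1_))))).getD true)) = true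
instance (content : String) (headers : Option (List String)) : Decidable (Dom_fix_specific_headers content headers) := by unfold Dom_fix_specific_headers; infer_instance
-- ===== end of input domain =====

-- B replaces A's forward pass (which pops already-emitted blank lines off the output
-- when a header appears) by a single reverse pass with a drop-blanks flag; same result,
-- alternative structure (no speed claim).

-- ===== PORT A =====
-- line.strip() is falsy  (shared by both ports, as in both Pythons)
def pvBlank (s : String) : Bool := PySem.Str.strip s == ""
-- any(line.strip().endswith(h) for h in headers)  (A's inner for-with-break = first match exists)
def pvIsHeader (headers : List String) (line : String) : Bool :=
  headers.any (fun h => PySem.Str.endswith (PySem.Str.strip line) h)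
-- while fixed and not fixed[-1].strip(): fixed.pop()   (popping from the back = dropWhile on the reverse)
def pvPopBlanks (fixed : List String) : List String :=
  (fixed.reverse.dropWhile pvBlank).reverse
-- one iteration of A's loop body
def pvStepA (hs : List String) (fixed : List String) (line : String) : List String :=
  if pvIsHeader hs line then pvPopBlanks fixed ++ ["", "", line] else fixed ++ [line]

def fix_specific_headers (content : String) (headers : Option (List String)) : String :=
  let hs := headers.getD ["Business Logic:"]
  PySem.Str.join "\n" (((PySem.Str.split? content "\n").getD []).foldl (pvStepA hs) [])

-- ===== PORT B =====
-- one iteration of B's reversed loop; state = (output so far in final order, drop_blanks flag)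
def pvStepB (hs : List String) (line : String) (st : List String × Bool) : List String × Bool :=
  if pvIsHeader hs line then ("" :: "" :: line :: st.1, true)
  else if pvBlank line && st.2 then st
  else (line :: st.1, false)

-- B's 'for line in reversed(lines)' building out then reversing = a right fold consing onto the front
def fix_specific_headers_alt (content : String) (headers : Option (List String)) : String :=
  let hs := headers.getD ["Business Logic:"]
  PySem.Str.join "\n" ((((PySem.Str.split? content "\n").getD []).foldr (pvStepB hs) ([], false)).1)

-- ===== PRECONDITION & SPEC =====
-- Pre_ excludes an effective header list containing the empty string: then every line (blanks
-- included) matches, and which inserted blanks A's pop loop later removes is an accident of its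
-- output-popping implementation — a degenerate corner no caller would specify either way.
def Pre_fix_specific_headers (content : String) (headers : Option (List String)) : Prop :=
  "" ∉ headers.getD ["Business Logic:"]
instance (content : String) (headers : Option (List String)) : Decidable (Pre_fix_specific_headers content headers) := by unfold Pre_fix_specific_headers; infer_instance

def pvWitness_fix_specific_headers : String × Option (List String) :=
  ("text\n\n\n  Business Logic:\ndetail", none)

def Spec_fix_specific_headers (content : String) (headers : Option (List String)) (out : String) : Prop := out = fix_specific_headers_alt content headers
instance (content : String) (headers : Option (List String)) (out : String) : Decidable (Spec_fix_specific_headers content headers out) := by unfold Spec_fix_specific_headers; infer_instance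

-- ===== CLAIM (what is proved, stated in full; the proofs are below) =====
def Claim_equal_fix_specific_headers : Prop := ∀ (content : String) (headers : Option (List String)), Dom_fix_specific_headers content headers → Pre_fix_specific_headers content headers → Spec_fix_specific_headers content headers (fix_specific_headers content headers)

-- ===== LEMMAS AND PROOFS =====

-- a line matching a nonempty header is not blank
lemma pvHeader_not_blank {hs : List String} {line : String}
    (hpre : "" ∉ hs) (h : pvIsHeader hs line = true) : pvBlank line = false := by
  rcases List.any_eq_true.mp h with ⟨hd, hmem, hend⟩
  by_contra hb
  have hb' : pvBlank line = true := by
    cases hbl : pvBlank line with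
    | false => exact absurd hbl hb
    | true => rfl
  have hnil : (PySem.Str.strip line).toList = [] := by
    have : PySem.Str.strip line = "" := by
      simpa [pvBlank] using hb'
    simp [this]
  have hsuffix : hd.toList <:+ (PySem.Str.strip line).toList := by
    have := (PySem.Chars.endswith_iff (s := (PySem.Str.strip line).toList) (p := hd.toList)).mp
    apply this
    simpa using hend
  rw [hnil] at hsuffix
  have : hd.toList = [] := List.eq_nil_of_suffix_nil hsuffix
  have : hd = "" := by
    have h2 := congrArg String.ofList this
    simpa using h2
  exact hpre (this ▸ hmem)

lemma pvPopBlanks_append (X : List String) (a : String) :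
    pvPopBlanks (X ++ [a]) = if pvBlank a then pvPopBlanks X else X ++ [a] := by
  unfold pvPopBlanks
  cases hb : pvBlank a <;> simp [hb]

-- main invariant: running A's forward loop from any partial output acc equals B's
-- right-fold output, with acc's trailing blanks popped exactly when B's flag is set
lemma pvLoop_eq (hs : List String) (hpre : "" ∉ hs) :
    ∀ (lines : List String) (acc : List String),
      lines.foldl (pvStepA hs) acc =
        (if (lines.foldr (pvStepB hs) ([], false)).2 then pvPopBlanks acc else acc)
          ++ (lines.foldr (pvStepB hs) ([], false)).1 := by
  intro lines
  induction lines with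
  | nil => intro acc; simp
  | cons line rest ih =>
    intro acc
    by_cases hh : pvIsHeader hs line = true
    · have hnb : pvBlank line = false := pvHeader_not_blank hpre hh
      have hstep : pvStepA hs acc line = pvPopBlanks acc ++ ["", ""] ++ [line] := by
        simp [pvStepA, hh]
      have hstepB : (line :: rest).foldr (pvStepB hs) ([], false)
          = ("" :: "" :: line :: (rest.foldr (pvStepB hs) ([], false)).1, true) := by
        simp [pvStepB, hh]
      have hpop : pvPopBlanks (pvPopBlanks acc ++ ["", "", line])
          = pvPopBlanks acc ++ ["", "", line] := by
        have := pvPopBlanks_append (pvPopBlanks acc ++ ["", ""]) line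
        simpa [hnb, List.append_assoc] using this
      rw [List.foldl_cons, hstep, ih, hstepB]
      by_cases hd : (rest.foldr (pvStepB hs) ([], false)).2 <;> simp [hd, hpop]
    · have hh' : pvIsHeader hs line = false := by
        cases h : pvIsHeader hs line with
        | true => exact absurd h hh
        | false => rfl
      have hstep : pvStepA hs acc line = acc ++ [line] := by
        simp [pvStepA, hh']
      rw [List.foldl_cons, hstep, ih]
      by_cases hb : pvBlank line = true
      · by_cases hd : (rest.foldr (pvStepB hs) ([], false)).2
        · -- blank line directly above a header block: B drops it, A will pop it
          have hstepB : (line :: rest).foldr (pvStepB hs) ([], false)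
              = rest.foldr (pvStepB hs) ([], false) := by
            simp [pvStepB, hh', hb, hd]
          have hpop : pvPopBlanks (acc ++ [line]) = pvPopBlanks acc := by
            simpa [hb] using pvPopBlanks_append acc line
          rw [hstepB]
          simp [hd, hpop]
        · have hd' : (rest.foldr (pvStepB hs) ([], false)).2 = false := by
            simpa using hd
          have hstepB : (line :: rest).foldr (pvStepB hs) ([], false)
              = (line :: (rest.foldr (pvStepB hs) ([], false)).1, false) := by
            simp [pvStepB, hh', hb, hd']
          rw [hstepB]
          simp [hd']
      · have hb' : pvBlank line = false := by
          cases h : pvBlank line with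
          | true => exact absurd h hb
          | false => rfl
        have hstepB : (line :: rest).foldr (pvStepB hs) ([], false)
            = (line :: (rest.foldr (pvStepB hs) ([], false)).1, false) := by
          simp [pvStepB, hh', hb']
        have hpop : pvPopBlanks (acc ++ [line]) = acc ++ [line] := by
          simpa [hb'] using pvPopBlanks_append acc line
        rw [hstepB]
        by_cases hd : (rest.foldr (pvStepB hs) ([], false)).2 <;> simp [hd, hpop]

-- ===== VERDICT (by name: the statement is the Claim_ definition above) =====
theorem fix_specific_headers_spec : Claim_equal_fix_specific_headers := by
  intro content headers _hdom hpre
  unfold Spec_fix_specific_headers fix_specific_headers fix_specific_headers_alt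
  have hpre' : "" ∉ headers.getD ["Business Logic:"] := hpre
  have h := pvLoop_eq (headers.getD ["Business Logic:"]) hpre'
      ((PySem.Str.split? content "\n").getD []) []
  simp only [h]
  by_cases hd : (((PySem.Str.split? content "\n").getD []).foldr
      (pvStepB (headers.getD ["Business Logic:"])) ([], false)).2 <;>
    simp [hd, pvPopBlanks]
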